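-- pv_equiv track=rewrite | github.com/zzzl-523/PS-Python-for-CodingTest | 백준 연습/자료구조/풍선 터뜨리기.py | check
-- ===== SOURCE A (Python) =====
-- def check(num_list, index, is_positive):
--     if index > len(num_list)-1:
--         index %= len(num_list)
--     elif index < 0:
--         index += len(num_list)
--
--     if num_list[index] == 0:
--         if is_positive:
--             return check(num_list, index+1, is_positive)
--         else:
--             return check(num_list, index-1, is_positive)
--     else:
--         return index
-- ===== SOURCE B (Python) =====
-- def check(num_list, index, is_positive):
--     n = len(num_list)
--     i = index % n
--     step = 1 if is_positive else -1
--     while num_list[i] == 0: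
--         i = (i + step) % n
--     return i
-- ===== Notes on version B (the rewrite author's own statement) =====
-- stated objective: simpler
-- what changed: Replaces A's recursion with its two-branch partial normalization by a single iterative while-loop over one modulo-reduced cursor; Pre_ excludes empty lists (A raises ZeroDivisionError/IndexError), all-zero lists (A recurses without returning) and index < -2*len (A raises IndexError).
-- intended difference: For index below -len (within Pre_), A's one-shot '+= len' normalization leaves a negative cursor and A can return a negative Python alias of the found position (e.g. -1), while B returns the canonical index in [0, len), which is the intended answer. — e.g. on check([0, 5], -3, true): A returns -1, B returns 1
import Mathlib
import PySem

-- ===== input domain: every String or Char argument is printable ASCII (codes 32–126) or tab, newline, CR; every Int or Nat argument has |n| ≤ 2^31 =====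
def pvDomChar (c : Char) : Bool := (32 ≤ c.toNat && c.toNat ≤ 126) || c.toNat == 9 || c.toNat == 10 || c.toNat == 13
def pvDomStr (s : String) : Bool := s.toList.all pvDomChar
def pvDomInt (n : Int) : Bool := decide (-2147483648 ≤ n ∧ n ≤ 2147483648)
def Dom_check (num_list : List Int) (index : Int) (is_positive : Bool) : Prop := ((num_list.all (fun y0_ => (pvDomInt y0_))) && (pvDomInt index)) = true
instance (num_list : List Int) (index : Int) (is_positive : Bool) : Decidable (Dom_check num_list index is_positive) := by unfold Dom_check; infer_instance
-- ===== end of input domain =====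

-- B replaces A's recursion (with its two-branch one-shot normalization) by a single
-- iterative loop over one modulo-reduced cursor: simpler and canonical.

-- ===== PORT A =====
-- fuel makes the recursion total; num_list.length + 2 steps suffice on every input of Pre_
def checkGo (fuel : Nat) (num_list : List Int) (index : Int) (is_positive : Bool) : Int :=
  match fuel with
  | 0 => 0
  | fuel + 1 =>
    let n : Int := num_list.length
    let index := if index > n - 1 then PySem.Int.mod index n
                 else if index < 0 then index + n else index
    match PySem.List.pyGet? num_list index with
    | none => 0  -- IndexError; excluded by Pre_check
    | some v =>
      if v == 0 then
        if is_positive then checkGo fuel num_list (index + 1) is_positive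
        else checkGo fuel num_list (index - 1) is_positive
      else index

def check (num_list : List Int) (index : Int) (is_positive : Bool) : Int :=
  checkGo (num_list.length + 2) num_list index is_positive

-- ===== PORT B =====
def checkAltGo (fuel : Nat) (num_list : List Int) (i : Int) (step : Int) : Int :=
  match fuel with
  | 0 => 0
  | fuel + 1 =>
    match PySem.List.pyGet? num_list i with
    | none => 0
    | some v =>
      if v == 0 then checkAltGo fuel num_list (PySem.Int.mod (i + step) num_list.length) step
      else i

def check_alt (num_list : List Int) (index : Int) (is_positive : Bool) : Int :=
  let i := PySem.Int.mod index (num_list.length : Int)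
  let step : Int := if is_positive then 1 else -1
  checkAltGo (num_list.length + 2) num_list i step

-- ===== PRECONDITION & SPEC =====
-- Pre_ excludes: empty lists (A raises ZeroDivisionError/IndexError), all-zero lists
-- (A recurses without bound), and index < -2*len (A's one-shot '+= len' leaves the
-- index out of range, IndexError).
def Pre_check (num_list : List Int) (index : Int) (is_positive : Bool) : Prop :=
  0 < num_list.length ∧ -2 * (num_list.length : Int) ≤ index ∧ ∃ x ∈ num_list, x ≠ 0
instance (num_list : List Int) (index : Int) (is_positive : Bool) : Decidable (Pre_check num_list index is_positive) := by unfold Pre_check; infer_instance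
def pvWitness_check : List Int × Int × Bool := ([0, 5], 3, true)

-- For index below -len (within Pre_), A's one-shot '+= len' normalization leaves a negative
-- cursor; exactly when the nonzero element is found while that cursor is still negative
-- (the wrapped start position is nonzero, or from index = -2*len going down, the last
-- element is nonzero), A returns a negative Python alias of the position (e.g. -1);
-- B returns the canonical index in [0, len), which is the intended answer.
def D_check (num_list : List Int) (index : Int) (is_positive : Bool) : Prop :=
  index < -(num_list.length : Int) ∧
    (num_list.getD (index + 2 * num_list.length).toNat 0 ≠ 0 ∨
     (index = -2 * (num_list.length : Int) ∧ is_positive = false ∧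
      num_list.getLast?.getD 0 ≠ 0))
instance (num_list : List Int) (index : Int) (is_positive : Bool) : Decidable (D_check num_list index is_positive) := by unfold D_check; infer_instance

def Spec_check (num_list : List Int) (index : Int) (is_positive : Bool) (out : Int) : Prop := ¬ D_check num_list index is_positive → out = check_alt num_list index is_positive
instance (num_list : List Int) (index : Int) (is_positive : Bool) (out : Int) : Decidable (Spec_check num_list index is_positive out) := by unfold Spec_check; infer_instance

def pvDiffWitness_check : List Int × Int × Bool := ([0, 5], -3, true)
def pvDiffWitnessOut_check : Int × Int := (-1, 1)

-- ===== CLAIM (what is proved, stated in full; the proofs are below) =====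
def Claim_unchanged_check : Prop := ∀ (num_list : List Int) (index : Int) (is_positive : Bool), Dom_check num_list index is_positive → Pre_check num_list index is_positive → Spec_check num_list index is_positive (check num_list index is_positive)
def Claim_changed_check : Prop := Dom_check (pvDiffWitness_check.1) (pvDiffWitness_check.2.1) (pvDiffWitness_check.2.2) ∧ Pre_check (pvDiffWitness_check.1) (pvDiffWitness_check.2.1) (pvDiffWitness_check.2.2) ∧ D_check (pvDiffWitness_check.1) (pvDiffWitness_check.2.1) (pvDiffWitness_check.2.2) ∧ check (pvDiffWitness_check.1) (pvDiffWitness_check.2.1) (pvDiffWitness_check.2.2) = pvDiffWitnessOut_check.1 ∧ check_alt (pvDiffWitness_check.1) (pvDiffWitness_check.2.1) (pvDiffWitness_check.2.2) = pvDiffWitnessOut_check.2 ∧ pvDiffWitnessOut_check.1 ≠ pvDiffWitnessOut_check.2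
def Claim_exact_check : Prop := ∀ (num_list : List Int) (index : Int) (is_positive : Bool), Dom_check num_list index is_positive → Pre_check num_list index is_positive → D_check num_list index is_positive → check num_list index is_positive ≠ check_alt num_list index is_positive
-- ===== LEMMAS AND PROOFS =====

lemma emod_shift (j n : Int) (hn : 0 < n) (h1 : -n ≤ j) (h2 : j < 0) : j % n = j + n := by
  have h3 : (j + n * 1) % n = j % n := Int.add_mul_emod_self_left j n 1
  rw [← h3]
  simp only [mul_one]
  exact Int.emod_eq_of_lt (by omega) (by omega)

lemma emod_shift2 (j n : Int) (hn : 0 < n) (h1 : -2*n ≤ j) (h2 : j < -n) : j % n = j + 2*n := by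
  have h3 : (j + n * 2) % n = j % n := Int.add_mul_emod_self_left j n 2
  rw [← h3]
  rw [show j + n*2 = (j + 2*n) by ring]
  exact Int.emod_eq_of_lt (by omega) (by omega)

lemma pyGet?_shift (l : List Int) (i : Int) (hn : 0 < l.length)
    (h1 : -(l.length : Int) ≤ i) (h2 : i < 0) :
    PySem.List.pyGet? l i = PySem.List.pyGet? l (i + l.length) := by
  have hk : i = -(((-i).toNat : Nat) : Int) := by omega
  rw [hk, PySem.List.pyGet?_neg_natCast l (-i).toNat (by omega) (by omega),
      PySem.List.pyGet?_of_nonneg l (by omega)]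
  congr 1
  omega

lemma checkGo_renorm (f : Nat) (l : List Int) (j : Int) (p : Bool)
    (hn : 0 < l.length) (hj : -(l.length : Int) ≤ j) :
    checkGo f l j p = checkGo f l (PySem.Int.mod j (l.length : Int)) p := by
  cases f with
  | zero => rfl
  | succ f =>
    have hn' : (0:Int) < (l.length : Int) := by exact_mod_cast hn
    have hm := PySem.Int.mod_eq_emod_of_pos (a := j) hn'
    have hm0 : 0 ≤ PySem.Int.mod j (l.length : Int) := PySem.Int.mod_nonneg j hn'
    have hmlt : PySem.Int.mod j (l.length : Int) < (l.length : Int) := PySem.Int.mod_lt j hn'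
    have hnorm : (if j > (l.length : Int) - 1 then PySem.Int.mod j (l.length : Int)
                  else if j < 0 then j + (l.length : Int) else j) = PySem.Int.mod j (l.length : Int) := by
      by_cases hgt : j > (l.length : Int) - 1
      · rw [if_pos hgt]
      · rw [if_neg hgt]
        by_cases hlt : j < 0
        · rw [if_pos hlt, hm, emod_shift j _ hn' hj hlt]
        · rw [if_neg hlt, hm, Int.emod_eq_of_lt (by omega) (by omega)]
    conv_lhs => rw [checkGo]
    conv_rhs => rw [checkGo]
    simp only [hnorm]
    rw [if_neg (by omega : ¬ PySem.Int.mod j ((l.length : Nat) : Int) > ((l.length : Nat) : Int) - 1),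
        if_neg (by omega : ¬ PySem.Int.mod j ((l.length : Nat) : Int) < 0)]

lemma altGo_nonneg (f : Nat) (l : List Int) (step : Int) :
    ∀ i : Int, 0 ≤ i → 0 ≤ checkAltGo f l i step := by
  induction f with
  | zero => intro i hi; simp [checkAltGo]
  | succ f ih =>
    intro i hi
    rw [checkAltGo]
    cases hg : PySem.List.pyGet? l i with
    | none => simp
    | some v =>
      have hmem := PySem.List.mem_of_pyGet?_eq_some l hg
      have hn : 0 < l.length := List.length_pos_of_mem hmem
      have hn' : (0:Int) < (l.length : Int) := by exact_mod_cast hn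
      by_cases hv : v = 0
      · simp only [hv]
        simpa using ih _ (PySem.Int.mod_nonneg _ hn')
      · simp [hv, hi]

lemma checkGo_eq_altGo (f : Nat) (l : List Int) (p : Bool) :
    ∀ i : Int, 0 ≤ i → i < (l.length : Int) →
    checkGo f l i p = checkAltGo f l i (if p then 1 else -1) := by
  induction f with
  | zero => intro i _ _; rfl
  | succ f ih =>
    intro i h0 h1
    have hn : 0 < l.length := by omega
    have hn' : (0:Int) < (l.length : Int) := by exact_mod_cast hn
    rw [checkGo, checkAltGo]
    rw [if_neg (by omega : ¬ i > ((l.length : Nat) : Int) - 1),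
        if_neg (by omega : ¬ i < 0)]
    cases hg : PySem.List.pyGet? l i with
    | none => rfl
    | some v =>
      by_cases hv : v = 0
      · simp only [hv, BEq.rfl, if_true]
        cases p with
        | true =>
          simp only [if_true]
          rw [checkGo_renorm f l (i+1) true hn (by omega)]
          exact ih _ (PySem.Int.mod_nonneg _ hn') (PySem.Int.mod_lt _ hn')
        | false =>
          simp only [Bool.false_eq_true, if_false]
          rw [checkGo_renorm f l (i-1) false hn (by omega)]
          exact ih _ (PySem.Int.mod_nonneg _ hn') (PySem.Int.mod_lt _ hn')
      · simp [hv]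

lemma emod_add_len (a n : Int) : (a + n) % n = a % n := by
  simpa using Int.add_mul_emod_self_left a n 1

lemma pyGet?_inrange_some (l : List Int) (i : Int) (h0 : 0 ≤ i) (h1 : i < (l.length : Int)) :
    ∃ v, PySem.List.pyGet? l i = some v := by
  exact ⟨_, PySem.List.pyGet?_eq_some_getElem l h0 h1⟩

lemma main_eq (l : List Int) (idx : Int) (p : Bool)
    (hn : 0 < l.length) (hidx : -2 * (l.length : Int) ≤ idx)
    (hnz : ∃ x ∈ l, x ≠ 0)
    (hd1 : idx < -(l.length : Int) → (PySem.List.pyGet? l (idx + 2 * l.length)).getD 0 = 0)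
    (hd2 : idx = -2 * (l.length : Int) → p = false →
           (PySem.List.pyGet? l ((l.length : Int) - 1)).getD 0 = 0) :
    checkGo (l.length + 2) l idx p
      = checkAltGo (l.length + 2) l (PySem.Int.mod idx (l.length : Int)) (if p then 1 else -1) := by
  have hn' : (0:Int) < (l.length : Int) := by exact_mod_cast hn
  by_cases hge : -((l.length : Int)) ≤ idx
  · rw [checkGo_renorm _ _ _ _ hn hge]
    exact checkGo_eq_altGo _ _ _ _ (PySem.Int.mod_nonneg _ hn') (PySem.Int.mod_lt _ hn')
  · have hlt : idx < -((l.length : Int)) := by omega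
    -- the element B starts at (and A wraps to) is zero, by hd1
    have hv0 : PySem.List.pyGet? l (idx + 2 * (l.length : Int)) = some 0 := by
      obtain ⟨v, hv⟩ := pyGet?_inrange_some l (idx + 2 * (l.length : Int)) (by omega) (by omega)
      have h := hd1 hlt
      rw [hv] at h ⊢
      simpa using h
    have hm : PySem.Int.mod idx ((l.length : Nat) : Int) = idx + 2 * (l.length : Int) := by
      rw [PySem.Int.mod_eq_emod_of_pos hn', emod_shift2 idx _ hn' (by omega) (by omega)]
    -- unfold A one step
    rw [show l.length + 2 = (l.length + 1) + 1 from rfl]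
    rw [checkGo]
    rw [if_neg (by omega : ¬ idx > ((l.length : Nat) : Int) - 1), if_pos (by omega : idx < 0)]
    rw [pyGet?_shift l (idx + (l.length : Int)) hn (by omega) (by omega)]
    rw [show (idx + ((l.length : Nat) : Int) + ((l.length : Nat) : Int)) = idx + 2 * (l.length : Int) by ring]
    rw [hv0]
    -- unfold B one step
    rw [checkAltGo, hm, hv0]
    simp only [BEq.rfl, if_true]
    cases p with
    | true =>
      simp only [if_true]
      rw [checkGo_renorm _ _ _ _ hn (by omega : -((l.length:Int)) ≤ idx + (l.length : Int) + 1)]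
      rw [checkGo_eq_altGo _ _ _ _ (PySem.Int.mod_nonneg _ hn') (PySem.Int.mod_lt _ hn')]
      congr 1
      rw [PySem.Int.mod_eq_emod_of_pos hn', PySem.Int.mod_eq_emod_of_pos hn']
      rw [show idx + 2 * ((l.length : Nat) : Int) + 1 = (idx + (l.length : Int) + 1) + (l.length : Int) by ring]
      rw [emod_add_len]
    | false =>
      simp only [Bool.false_eq_true, if_false]
      by_cases hdeep : idx = -2 * ((l.length : Int))
      · -- A's cursor passes through -1
        have hw0 : PySem.List.pyGet? l ((l.length : Int) - 1) = some 0 := by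
          obtain ⟨w, hw⟩ := pyGet?_inrange_some l ((l.length : Int) - 1) (by omega) (by omega)
          have h := hd2 hdeep rfl
          rw [hw] at h ⊢
          simpa using h
        have hn2 : 2 ≤ l.length := by
          by_contra hcon
          have h1 : l.length = 1 := by omega
          obtain ⟨x, hx, hxne⟩ := hnz
          obtain ⟨a, ha⟩ := List.length_eq_one_iff.mp h1
          have h0mem : (0:Int) ∈ l := PySem.List.mem_of_pyGet?_eq_some l hv0
          subst ha
          simp at hx h0mem
          exact hxne (hx.trans h0mem.symm)
        -- A: second step from -len-1
        rw [checkGo]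
        rw [if_neg (by omega : ¬ idx + ((l.length : Nat) : Int) - 1 > ((l.length : Nat) : Int) - 1),
            if_pos (by omega : idx + ((l.length : Nat) : Int) - 1 < 0)]
        rw [show idx + ((l.length : Nat) : Int) - 1 + ((l.length : Nat) : Int) = -1 by omega]
        rw [pyGet?_shift l (-1) hn (by omega) (by omega)]
        rw [show ((-1 : Int) + ((l.length : Nat) : Int)) = ((l.length : Int) - 1) by ring]
        rw [hw0]
        simp only [BEq.rfl, if_true, Bool.false_eq_true, if_false]
        rw [show (-1 : Int) - 1 = -2 by ring]
        rw [checkGo_renorm _ _ _ _ hn (by omega : -((l.length:Int)) ≤ -2)]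
        rw [checkGo_eq_altGo _ _ _ _ (PySem.Int.mod_nonneg _ hn') (PySem.Int.mod_lt _ hn')]
        -- B: second step from len-1
        rw [show idx + 2 * ((l.length : Nat) : Int) + -1 = -1 by omega]
        rw [show PySem.Int.mod (-1) ((l.length : Nat) : Int) = (l.length : Int) - 1 by
          rw [PySem.Int.mod_eq_emod_of_pos hn', emod_shift (-1) _ hn' (by omega) (by omega)]; ring]
        rw [checkAltGo, hw0]
        simp only [BEq.rfl, if_true]
        congr 1
        rw [PySem.Int.mod_eq_emod_of_pos hn', PySem.Int.mod_eq_emod_of_pos hn']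
        rw [show ((l.length : Nat) : Int) - 1 + -1 = -2 + (l.length : Int) by ring]
        rw [emod_add_len]
      · rw [checkGo_renorm _ _ _ _ hn (by omega : -((l.length:Int)) ≤ idx + (l.length : Int) - 1)]
        rw [checkGo_eq_altGo _ _ _ _ (PySem.Int.mod_nonneg _ hn') (PySem.Int.mod_lt _ hn')]
        congr 1
        rw [PySem.Int.mod_eq_emod_of_pos hn', PySem.Int.mod_eq_emod_of_pos hn']
        rw [show idx + 2 * ((l.length : Nat) : Int) + -1 = (idx + (l.length : Int) - 1) + (l.length : Int) by ring]
        rw [emod_add_len]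

lemma getD_bridge (l : List Int) (i : Int) (h0 : 0 ≤ i) (h1 : i < (l.length : Int)) :
    l.getD i.toNat 0 = (PySem.List.pyGet? l i).getD 0 := by
  rw [PySem.List.pyGet?_eq_some_getElem l h0 h1]
  simp [List.getD_eq_getElem?_getD, List.getElem?_eq_getElem (by omega : i.toNat < l.length)]

lemma getLast_bridge (l : List Int) (hn : 0 < l.length) :
    l.getLast?.getD 0 = (PySem.List.pyGet? l ((l.length : Int) - 1)).getD 0 := by
  rw [PySem.List.pyGet?_eq_some_getElem l (by omega) (by omega)]
  rw [List.getLast?_eq_getElem?]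
  simp [List.getElem?_eq_getElem (by omega : l.length - 1 < l.length)]

-- D_check's element tests, rephrased through pyGet? (the Python indexing primitive)
lemma D_iff (l : List Int) (idx : Int) (p : Bool) (hn : 0 < l.length)
    (hidx : -2 * (l.length : Int) ≤ idx) (hlt : idx < -(l.length : Int)) :
    D_check l idx p ↔
      ((PySem.List.pyGet? l (idx + 2 * l.length)).getD 0 ≠ 0 ∨
       (idx = -2 * (l.length : Int) ∧ p = false ∧
        (PySem.List.pyGet? l ((l.length : Int) - 1)).getD 0 ≠ 0)) := by
  unfold D_check
  rw [getD_bridge l (idx + 2 * l.length) (by omega) (by omega), getLast_bridge l hn]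
  constructor
  · rintro ⟨-, h⟩; exact h
  · intro h; exact ⟨hlt, h⟩

-- ===== VERDICT (by name: the statement is the Claim_ definition above) =====
theorem check_spec : Claim_unchanged_check := by
  intro l idx p _ hpre hnd
  obtain ⟨hn, hidx, hnz⟩ := hpre
  show checkGo (l.length + 2) l idx p
      = checkAltGo (l.length + 2) l (PySem.Int.mod idx (l.length : Int)) (if p then 1 else -1)
  refine main_eq l idx p hn hidx hnz ?_ ?_
  · intro hlt
    by_contra h
    exact hnd ((D_iff l idx p hn hidx hlt).mpr (Or.inl h))
  · intro h1 h2
    by_contra h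
    exact hnd ((D_iff l idx p hn hidx (by omega)).mpr (Or.inr ⟨h1, h2, h⟩))

theorem check_changed : Claim_changed_check := by unfold Claim_changed_check; decide

theorem check_tight : Claim_exact_check := by
  intro l idx p _ hpre hd
  obtain ⟨hn, hidx, hnz⟩ := hpre
  have hlt : idx < -(l.length : Int) := hd.1
  have hd' := (D_iff l idx p hn hidx hlt).mp hd
  have hpre' : Pre_check l idx p := ⟨hn, hidx, hnz⟩
  revert hd'
  intro hdisj
  have hn' : (0:Int) < (l.length : Int) := by exact_mod_cast hn
  have hB : 0 ≤ check_alt l idx p := by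
    show 0 ≤ checkAltGo (l.length + 2) l (PySem.Int.mod idx (l.length : Int)) (if p then 1 else -1)
    exact altGo_nonneg _ _ _ _ (PySem.Int.mod_nonneg _ hn')
  by_cases hX : (PySem.List.pyGet? l (idx + 2 * l.length)).getD 0 ≠ 0
  · -- A returns the negative cursor idx + len immediately
    obtain ⟨v, hv⟩ := pyGet?_inrange_some l (idx + 2 * (l.length : Int)) (by omega) (by omega)
    have hvne : ¬ (v == 0) = true := by
      rw [hv] at hX; simpa using hX
    have hA : check l idx p = idx + (l.length : Int) := by
      show checkGo (l.length + 2) l idx p = _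
      rw [show l.length + 2 = (l.length + 1) + 1 from rfl, checkGo]
      rw [if_neg (by omega : ¬ idx > ((l.length : Nat) : Int) - 1), if_pos (by omega : idx < 0)]
      rw [pyGet?_shift l (idx + (l.length : Int)) hn (by omega) (by omega)]
      rw [show (idx + ((l.length : Nat) : Int) + ((l.length : Nat) : Int)) = idx + 2 * (l.length : Int) by ring]
      rw [hv]
      simp [hvne]
    omega
  · -- then the second disjunct holds: A walks to -1 and returns it
    have hv0 : PySem.List.pyGet? l (idx + 2 * (l.length : Int)) = some 0 := by
      obtain ⟨v, hv⟩ := pyGet?_inrange_some l (idx + 2 * (l.length : Int)) (by omega) (by omega)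
      rw [not_not] at hX
      rw [hv] at hX ⊢
      simpa using hX
    rcases hdisj with hX' | ⟨h1, h2, hY⟩
    · exact absurd hX' hX
    obtain ⟨w, hw⟩ := pyGet?_inrange_some l ((l.length : Int) - 1) (by omega) (by omega)
    have hwne : ¬ (w == 0) = true := by
      rw [hw] at hY; simpa using hY
    have hn2 : 2 ≤ l.length := by
      by_contra hcon
      have h1' : l.length = 1 := by omega
      obtain ⟨x, hx, hxne⟩ := hnz
      obtain ⟨a, ha⟩ := List.length_eq_one_iff.mp h1'
      have h0mem : (0:Int) ∈ l := PySem.List.mem_of_pyGet?_eq_some l hv0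
      subst ha
      simp at hx h0mem
      exact hxne (hx.trans h0mem.symm)
    subst h2
    have hA : check l idx false = -1 := by
      show checkGo (l.length + 2) l idx false = _
      rw [show l.length + 2 = (l.length + 1) + 1 from rfl, checkGo]
      rw [if_neg (by omega : ¬ idx > ((l.length : Nat) : Int) - 1), if_pos (by omega : idx < 0)]
      rw [pyGet?_shift l (idx + (l.length : Int)) hn (by omega) (by omega)]
      rw [show (idx + ((l.length : Nat) : Int) + ((l.length : Nat) : Int)) = idx + 2 * (l.length : Int) by ring]
      rw [hv0]
      simp only [BEq.rfl, if_true, Bool.false_eq_true, if_false]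
      rw [checkGo]
      rw [if_neg (by omega : ¬ idx + ((l.length : Nat) : Int) - 1 > ((l.length : Nat) : Int) - 1),
          if_pos (by omega : idx + ((l.length : Nat) : Int) - 1 < 0)]
      rw [show idx + ((l.length : Nat) : Int) - 1 + ((l.length : Nat) : Int) = -1 by omega]
      rw [pyGet?_shift l (-1) hn (by omega) (by omega)]
      rw [show ((-1 : Int) + ((l.length : Nat) : Int)) = ((l.length : Int) - 1) by ring]
      rw [hw]
      simp [hwne]
    omega
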